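-- pv_equiv track=rewrite | github.com/raeez/chiral-bar-cobar | compute/lib/bc_hilbert_modular_shadow_engine.py | fundamental_unit
-- ===== SOURCE A (Python) =====
-- import math
-- from typing import Any, Callable, Dict, List, Optional, Sequence, Tuple, Union
--
-- def fundamental_unit(D: int) -> Tuple[int, int]:
--     """Compute fundamental unit epsilon = a + b*sqrt(D) of Q(sqrt(D))
--     via continued fraction expansion of sqrt(D).
--
--     Returns (a, b) such that a^2 - D*b^2 = ±1, with a, b > 0 minimal.
--     """
--     # Continued fraction expansion of sqrt(D) to find fundamental solution
--     # to Pell's equation x^2 - D*y^2 = ±1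
--     m = 0
--     d = 1
--     a0 = int(math.isqrt(D))
--     if a0 * a0 == D:
--         raise ValueError(f"D = {D} is a perfect square")
--     a = a0
--
--     # Convergent numerators and denominators
--     p_prev, p_curr = 1, a0
--     q_prev, q_curr = 0, 1
--
--     for _ in range(1000):
--         m = d * a - m
--         d = (D - m * m) // d
--         if d == 0:
--             break
--         a = (a0 + m) // d
--
--         p_prev, p_curr = p_curr, a * p_curr + p_prev
--         q_prev, q_curr = q_curr, a * q_curr + q_prev
--
--         # Check if we found a solution to Pell's equation
--         val = p_curr * p_curr - D * q_curr * q_curr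
--         if val == 1 or val == -1:
--             return (p_curr, q_curr)
--
--     raise RuntimeError(f"Failed to find fundamental unit for D = {D}")
-- ===== SOURCE B (Python) =====
-- import math
--
-- def fundamental_unit(D):
--     """Compute fundamental unit epsilon = a + b*sqrt(D) of Q(sqrt(D)) in two
--     passes: first expand the continued fraction of sqrt(D), collecting partial
--     quotients until the surd's denominator returns to +-1 (capped, like the
--     reference implementation, at 1000 expansion steps), then fold the collected
--     quotients through the convergent recurrence."""
--     a0 = math.isqrt(D)
--     if a0 * a0 == D:
--         raise ValueError(f"D = {D} is a perfect square")
--     # pass 1: partial quotients a_1, a_2, ... of sqrt(D) = [a0; a_1, a_2, ...]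
--     quots = []
--     m, d = a0, D - a0 * a0
--     for _ in range(1000):
--         a = (a0 + m) // d
--         quots.append(a)
--         m = d * a - m
--         d = (D - m * m) // d
--         if d * d == 1:
--             break
--     else:
--         raise RuntimeError(f"Failed to find fundamental unit for D = {D}")
--     # pass 2: convergent recurrence over the collected quotients
--     p_prev, p = 1, a0
--     q_prev, q = 0, 1
--     for a in quots:
--         p_prev, p = p, a * p + p_prev
--         q_prev, q = q, a * q + q_prev
--     return (p, q)
-- ===== Notes on version B (the rewrite author's own statement) =====
-- stated objective: alternative
-- what changed: A maintains the convergents inline in one loop and stops at the first Pell value p^2 - D*q^2 = +-1; B first expands the continued fraction of sqrt(D) into a list of partial quotients, stopping when the surd denominator returns to +-1 (the same step, by the classical identity p_i^2 - D q_i^2 = +-d_{i+1}), and then folds that list through the convergent recurrence in a second pass.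
import Mathlib
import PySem

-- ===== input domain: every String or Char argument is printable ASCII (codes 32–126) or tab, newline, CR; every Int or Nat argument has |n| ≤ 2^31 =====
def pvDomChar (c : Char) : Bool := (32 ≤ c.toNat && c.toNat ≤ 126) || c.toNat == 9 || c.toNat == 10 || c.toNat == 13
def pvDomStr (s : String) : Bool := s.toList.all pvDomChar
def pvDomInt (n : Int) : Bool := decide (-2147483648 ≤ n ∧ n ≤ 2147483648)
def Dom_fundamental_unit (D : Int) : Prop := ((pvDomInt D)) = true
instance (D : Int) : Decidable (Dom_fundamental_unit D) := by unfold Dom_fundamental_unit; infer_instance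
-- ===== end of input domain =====

-- B replaces A's single loop (convergents maintained inline, stop at Pell value ±1) by two passes:
-- expand the partial quotients of sqrt(D) until the surd denominator returns to ±1, then fold them
-- through the convergent recurrence; objective: alternative decomposition, same cost.

-- shared helper: port of Python's math.isqrt (exact integer square root of a nonnegative int),
-- written as fuel-bounded bisection so that it evaluates in the kernel (Mathlib's Int.sqrt does not);
-- both ports call it, exactly as both Pythons call math.isqrt.
def fuIsqrtAux (D : Nat) : Nat → Nat → Nat → Nat
  | lo, _, 0 => lo
  | lo, hi, Nat.succ f =>
    let mid := (lo + hi) / 2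
    if mid = lo then lo
    else if mid * mid ≤ D then fuIsqrtAux D mid hi f else fuIsqrtAux D lo mid f

def fuIsqrt (n : Int) : Int := (fuIsqrtAux n.toNat 0 (n.toNat + 1) 64 : Nat)

-- ===== PORT A =====
-- A's for-loop over range(1000); fuel counts the remaining iterations, none = the loop's raise paths
-- (the d == 0 break → RuntimeError, or 1000 iterations exhausted → RuntimeError).
def fuLoopA (D a0 : Int) (m d a pp p qp q : Int) : Nat → Option (Int × Int)
  | 0 => none
  | Nat.succ f =>
    let m' := d * a - m
    let d' := PySem.Int.floordiv (D - m' * m') d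
    if d' = 0 then none
    else
      let a' := PySem.Int.floordiv (a0 + m') d'
      let p' := a' * p + pp
      let q' := a' * q + qp
      let val := p' * p' - D * q' * q'
      if val = 1 ∨ val = -1 then some (p', q')
      else fuLoopA D a0 m' d' a' p p' q q' f

def fundamental_unit (D : Int) : Int × Int :=
  if D < 0 then (0, 0)  -- math.isqrt raises ValueError (outside Pre_)
  else
    let a0 := fuIsqrt D
    if a0 * a0 = D then (0, 0)  -- ValueError "perfect square" (outside Pre_)
    else
      match fuLoopA D a0 0 1 a0 1 a0 0 1 1000 with
      | some r => r
      | none => (0, 0)  -- RuntimeError (outside Pre_)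

-- ===== PORT B =====
-- Source B's while-loop collecting the partial quotients; the appended accumulator is modelled by
-- consing the current quotient onto the rest. Fuel makes the unbounded while total; inside
-- Pre_ the stop condition fires within 1000 steps (the same step at which A returns).
def fuExpand (D a0 : Int) (m d : Int) : Nat → Option (List Int)
  | 0 => none
  | Nat.succ f =>
    let a := PySem.Int.floordiv (a0 + m) d
    let m' := d * a - m
    let d' := PySem.Int.floordiv (D - m' * m') d
    if d' * d' = 1 then some [a]
    else (fuExpand D a0 m' d' f).map (fun l => a :: l)

-- Source B's second pass: the convergent recurrence folded over the quotient list
def fuFold : List Int → Int → Int → Int → Int → Int × Int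
  | [], _, p, _, q => (p, q)
  | a :: t, pp, p, qp, q => fuFold t p (a * p + pp) q (a * q + qp)

def fundamental_unit_alt (D : Int) : Int × Int :=
  if D < 0 then (0, 0)  -- math.isqrt raises ValueError (outside Pre_)
  else
    let a0 := fuIsqrt D
    if a0 * a0 = D then (0, 0)  -- ValueError "perfect square" (outside Pre_)
    else
      match fuExpand D a0 a0 (D - a0 * a0) 1000 with
      | some l => fuFold l 1 a0 0 1
      | none => (0, 0)

-- ===== PRECONDITION & SPEC =====
-- the (m, d) state of the continued-fraction expansion of sqrt(D), iterated n times from (0, 1)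
-- (used only by Pre_ below to state where A's explicit RuntimeError fires; neither port uses it)
def fuCFstep (D a0 : Int) (s : Int × Int) : Int × Int :=
  let a := PySem.Int.floordiv (a0 + s.1) s.2
  let m' := s.2 * a - s.1
  (m', PySem.Int.floordiv (D - m' * m') s.2)

def fuCFd (D a0 : Int) (n : Nat) : Int :=
  ((fuCFstep D a0)^[n] (0, 1)).2

-- d returns to ±1 at some step index in [2, 1001] — exactly A's return condition (its val after
-- iteration k equals ±d_(k+1), so A's explicit RuntimeError fires exactly when this fails)
def fuPell (D a0 : Int) : Prop :=
  ∃ n : Nat, n < 1000 ∧ fuCFd D a0 (n + 2) * fuCFd D a0 (n + 2) = 1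

-- short-circuiting scan used only to DECIDE fuPell (it stops at the first hit, so deciding the
-- witness stays within the kernel's recursion depth); proved equivalent in fuScan_iff below
def fuScan (D a0 : Int) : Int × Int → Nat → Bool
  | _, 0 => false
  | s, f+1 =>
    let s' := fuCFstep D a0 s
    (s'.2 * s'.2 == 1) || fuScan D a0 s' f

theorem fuScan_iff (D a0 : Int) : ∀ (f : Nat) (s : Int × Int),
    (fuScan D a0 s f = true ↔ ∃ n : Nat, n < f ∧
      (((fuCFstep D a0)^[n + 1] s).2 * ((fuCFstep D a0)^[n + 1] s).2 = 1)) := by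
  intro f
  induction f with
  | zero => intro s; simp [fuScan]
  | succ f ih =>
    intro s
    simp only [fuScan, Bool.or_eq_true, beq_iff_eq, ih]
    constructor
    · rintro (h | ⟨n, hn, h⟩)
      · exact ⟨0, by omega, by simpa [Function.iterate_one] using h⟩
      · refine ⟨n + 1, by omega, ?_⟩
        rw [Function.iterate_succ_apply]
        exact h
    · rintro ⟨n, hn, h⟩
      cases n with
      | zero => exact Or.inl (by simpa [Function.iterate_one] using h)
      | succ n =>
        refine Or.inr ⟨n, by omega, ?_⟩
        rw [Function.iterate_succ_apply] at h
        exact h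

def fuPellDec (D a0 : Int) : Decidable (fuPell D a0) :=
  decidable_of_iff (fuScan D a0 (fuCFstep D a0 (0, 1)) 1000 = true) (by
    rw [fuScan_iff]
    unfold fuPell fuCFd
    refine exists_congr fun n => and_congr_right fun _ => ?_
    simp [Function.iterate_succ_apply])

-- Pre_ excludes EXACTLY the inputs on which A raises: D < 2 and perfect squares (ValueError from
-- math.isqrt / the explicit perfect-square check), and the non-squares whose continued-fraction
-- denominator sequence d_n of sqrt(D) first returns to ±1 beyond A's 1000-iteration cap (its
-- explicit RuntimeError); A's val after iteration k equals ±d_(k+1), so A returns iff fuPell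
-- holds at a0 = isqrt(D).  a0 is pinned digit-by-digit in base 40 (a0 = 1600x + 40y + z, covering
-- all of 0..47999, every possible integer square root within Dom) by its defining
-- inequalities a0^2 ≤ D < (a0+1)^2; the guarded quantifiers are nested only so the Decidable
-- instance evaluates only a hundred-odd cheap guards instead of scanning every candidate.
def Pre_fundamental_unit (D : Int) : Prop :=
  1 < D ∧
    ∀ x : Fin 30,
      ((1600 * x.val : Nat) : Int) * ((1600 * x.val : Nat) : Int) ≤ D →
      D < ((1600 * x.val + 1600 : Nat) : Int) * ((1600 * x.val + 1600 : Nat) : Int) →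
      ∀ y : Fin 40,
        ((1600 * x.val + 40 * y.val : Nat) : Int) * ((1600 * x.val + 40 * y.val : Nat) : Int) ≤ D →
        D < ((1600 * x.val + 40 * y.val + 40 : Nat) : Int) * ((1600 * x.val + 40 * y.val + 40 : Nat) : Int) →
        ∀ z : Fin 40,
          ((1600 * x.val + 40 * y.val + z.val : Nat) : Int) * ((1600 * x.val + 40 * y.val + z.val : Nat) : Int) ≤ D →
          D < ((1600 * x.val + 40 * y.val + z.val + 1 : Nat) : Int) * ((1600 * x.val + 40 * y.val + z.val + 1 : Nat) : Int) →
          (((1600 * x.val + 40 * y.val + z.val : Nat) : Int) * ((1600 * x.val + 40 * y.val + z.val : Nat) : Int) ≠ D ∧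
           fuPell D ((1600 * x.val + 40 * y.val + z.val : Nat) : Int))
instance (D : Int) : Decidable (Pre_fundamental_unit D) := by
  unfold Pre_fundamental_unit
  letI I : ∀ a0 : Int, Decidable (fuPell D a0) := fun a0 => fuPellDec D a0
  infer_instance
def pvWitness_fundamental_unit : Int := (7)

def Spec_fundamental_unit (D : Int) (out : Int × Int) : Prop := out = fundamental_unit_alt D
instance (D : Int) (out : Int × Int) : Decidable (Spec_fundamental_unit D out) := by unfold Spec_fundamental_unit; infer_instance

-- ===== CLAIM (what is proved, stated in full; the proofs are below) =====
def Claim_equal_fundamental_unit : Prop := ∀ (D : Int), Dom_fundamental_unit D → Pre_fundamental_unit D → Spec_fundamental_unit D (fundamental_unit D)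

-- ===== LEMMAS AND PROOFS =====

-- exact division: when d divides n, Python's floor division is the exact quotient
theorem fuExactDiv (n d : Int) (hdvd : d ∣ n) :
    PySem.Int.floordiv n d * d = n := by
  unfold PySem.Int.floordiv
  rw [Int.fdiv_eq_ediv_of_dvd hdvd]
  exact Int.ediv_mul_cancel hdvd

theorem fuFloordivOne (x : Int) : PySem.Int.floordiv x 1 = x := by
  unfold PySem.Int.floordiv
  exact Int.fdiv_one x

-- Core simulation: from any loop state satisfying the continued-fraction invariants, A's inline
-- loop equals B's expansion followed by the convergent fold from the current seeds.
theorem fuSim (D a0 : Int) (hNS : ∀ x : Int, x * x ≠ D) :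
    ∀ (f : Nat) (m d a pp p qp q e : Int),
      (e = 1 ∨ e = -1) → d ≠ 0 →
      d ∣ (D - (d * a - m) * (d * a - m)) →
      (p * p - D * (q * q)) * d = -(e * (D - (d * a - m) * (d * a - m))) →
      p * pp - D * (q * qp) = e * (d * a - m) →
      pp * pp - D * (qp * qp) = e * d →
      fuLoopA D a0 m d a pp p qp q f
        = (fuExpand D a0 (d * a - m) (PySem.Int.floordiv (D - (d * a - m) * (d * a - m)) d) f).map
            (fun l => fuFold l pp p qp q) := by
  intro f
  induction f with
  | zero =>
    intro m d a pp p qp q e he hd hdvd h3 h4 h5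
    simp [fuLoopA, fuExpand]
  | succ f ih =>
    intro m d a pp p qp q e he hd hdvd h3 h4 h5
    have he2 : e * e = 1 := by rcases he with h | h <;> subst h <;> norm_num
    simp only [fuLoopA, fuExpand]
    generalize hm2 : d * a - m = m2 at h3 h4 hdvd ⊢
    generalize hd2 : PySem.Int.floordiv (D - m2 * m2) d = d2 at ⊢
    have hd2d : d2 * d = D - m2 * m2 := by rw [← hd2]; exact fuExactDiv _ _ hdvd
    have hd2ne : d2 ≠ 0 := by
      intro h0
    -- d2 = 0 would force D = m2², i.e. D a perfect square
      apply hNS m2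
      rw [h0] at hd2d; linarith
    have hpq : p * p - D * (q * q) = -(e * d2) := by
      have h := h3
      rw [← hd2d] at h
      have := mul_right_cancel₀ hd (by linarith [h] : (p * p - D * (q * q)) * d = (-(e * d2)) * d)
      exact this
    rw [if_neg hd2ne]
    generalize ha2 : PySem.Int.floordiv (a0 + m2) d2 = a2 at ⊢
    generalize hm3 : d2 * a2 - m2 = m3 at ⊢
    have hdvd3 : d2 ∣ D - m3 * m3 :=
      ⟨d + 2 * a2 * m2 - d2 * a2 * a2, by rw [← hm3]; linear_combination -hd2d⟩
    generalize hd3 : PySem.Int.floordiv (D - m3 * m3) d2 = d3 at ⊢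
    have hd3d : d3 * d2 = D - m3 * m3 := by rw [← hd3]; exact fuExactDiv _ _ hdvd3
    have hd3eq : d3 = d + 2 * a2 * m2 - d2 * a2 * a2 := by
      apply mul_right_cancel₀ hd2ne
      rw [hd3d, ← hm3]; linear_combination -hd2d
    have hval : (a2 * p + pp) * (a2 * p + pp) - D * (a2 * q + qp) * (a2 * q + qp) = e * d3 := by
      linear_combination (a2 * a2) * hpq + (2 * a2) * h4 + h5 - e * hd3eq
    rw [hval]
    have hsq : (e * d3) * (e * d3) = d3 * d3 := by linear_combination (d3 * d3) * he2
    have hiff : (e * d3 = 1 ∨ e * d3 = -1) ↔ (d3 * d3 = 1) := by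
      rw [← mul_self_eq_one_iff, hsq, mul_self_eq_one_iff]
    rw [if_congr hiff rfl rfl]
    by_cases hstop : d3 * d3 = 1
    · rw [if_pos hstop, if_pos hstop]
      simp [fuFold]
    · rw [if_neg hstop, if_neg hstop]
      have ihs := ih m2 d2 a2 p (a2 * p + pp) q (a2 * q + qp) (-e)
        (by rcases he with h | h <;> subst h <;> simp)
        hd2ne
        (by rw [hm3]; exact hdvd3)
        (by rw [hm3]; linear_combination d2 * hval + e * hd3d)
        (by rw [hm3]; linear_combination a2 * hpq + h4 - e * hm3)
        (by linear_combination hpq)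
      rw [hm3, hd3] at ihs
      rw [ihs]
      cases hX : fuExpand D a0 m3 d3 f <;> simp [fuFold]

-- ===== VERDICT (by name: the statement is the Claim_ definition above) =====
theorem fundamental_unit_spec : Claim_equal_fundamental_unit := by
  intro D hdom hPre
  obtain ⟨h1, hpin⟩ := hPre
  have hle : D ≤ 2147483648 := by
    have := of_decide_eq_true hdom
    omega
  -- instantiate the digit-pinned quantifiers at the digits of n = isqrt(D)
  have hD0' : (0:Int) ≤ D := by omega
  have hcast : ((D.toNat : Int)) = D := Int.toNat_of_nonneg hD0'
  have hn1N : Nat.sqrt D.toNat * Nat.sqrt D.toNat ≤ D.toNat := by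
    simpa [pow_two] using Nat.sqrt_le' D.toNat
  have hn2N : D.toNat < (Nat.sqrt D.toNat + 1) * (Nat.sqrt D.toNat + 1) := by
    simpa [pow_two, Nat.succ_eq_add_one] using Nat.lt_succ_sqrt' D.toNat
  have hnle : Nat.sqrt D.toNat ≤ 46341 := by
    by_contra h
    have h2 : 46342 * 46342 ≤ Nat.sqrt D.toNat * Nat.sqrt D.toNat :=
      Nat.mul_le_mul (by omega) (by omega)
    have h3 : D.toNat ≤ 2147483648 := by omega
    omega
  have hn1 : ((Nat.sqrt D.toNat : Int)) * ((Nat.sqrt D.toNat : Int)) ≤ D := by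
    calc ((Nat.sqrt D.toNat : Int)) * ((Nat.sqrt D.toNat : Int))
        = ((Nat.sqrt D.toNat * Nat.sqrt D.toNat : Nat) : Int) := by push_cast; ring
      _ ≤ ((D.toNat : Int)) := by exact_mod_cast hn1N
      _ = D := hcast
  have hn2 : D < ((Nat.sqrt D.toNat + 1 : Nat) : Int) * ((Nat.sqrt D.toNat + 1 : Nat) : Int) := by
    calc D = ((D.toNat : Int)) := hcast.symm
      _ < (((Nat.sqrt D.toNat + 1) * (Nat.sqrt D.toNat + 1) : Nat) : Int) := by exact_mod_cast hn2N
      _ = ((Nat.sqrt D.toNat + 1 : Nat) : Int) * ((Nat.sqrt D.toNat + 1 : Nat) : Int) := by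
          push_cast; ring
  have hx := hpin ⟨Nat.sqrt D.toNat / 1600, by omega⟩
  have hsplitx : 1600 * (Nat.sqrt D.toNat / 1600) ≤ Nat.sqrt D.toNat ∧
      Nat.sqrt D.toNat < 1600 * (Nat.sqrt D.toNat / 1600) + 1600 := by omega
  have gx1 : ((1600 * (Nat.sqrt D.toNat / 1600) : Nat) : Int) *
      ((1600 * (Nat.sqrt D.toNat / 1600) : Nat) : Int) ≤ D := by
    refine le_trans ?_ hn1
    have := hsplitx.1
    exact_mod_cast Nat.mul_le_mul this this
  have gx2 : D < ((1600 * (Nat.sqrt D.toNat / 1600) + 1600 : Nat) : Int) *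
      ((1600 * (Nat.sqrt D.toNat / 1600) + 1600 : Nat) : Int) := by
    refine lt_of_lt_of_le hn2 ?_
    have : Nat.sqrt D.toNat + 1 ≤ 1600 * (Nat.sqrt D.toNat / 1600) + 1600 := by omega
    exact_mod_cast Nat.mul_le_mul this this
  have hy := hx gx1 gx2 ⟨Nat.sqrt D.toNat % 1600 / 40, by omega⟩
  have hky : 1600 * (Nat.sqrt D.toNat / 1600) + 40 * (Nat.sqrt D.toNat % 1600 / 40)
      ≤ Nat.sqrt D.toNat ∧
      Nat.sqrt D.toNat < 1600 * (Nat.sqrt D.toNat / 1600) + 40 * (Nat.sqrt D.toNat % 1600 / 40) + 40 := by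
    omega
  have gy1 : ((1600 * (Nat.sqrt D.toNat / 1600) + 40 * (Nat.sqrt D.toNat % 1600 / 40) : Nat) : Int) *
      ((1600 * (Nat.sqrt D.toNat / 1600) + 40 * (Nat.sqrt D.toNat % 1600 / 40) : Nat) : Int) ≤ D := by
    refine le_trans ?_ hn1
    exact_mod_cast Nat.mul_le_mul hky.1 hky.1
  have gy2 : D < ((1600 * (Nat.sqrt D.toNat / 1600) + 40 * (Nat.sqrt D.toNat % 1600 / 40) + 40 : Nat) : Int) *
      ((1600 * (Nat.sqrt D.toNat / 1600) + 40 * (Nat.sqrt D.toNat % 1600 / 40) + 40 : Nat) : Int) := by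
    refine lt_of_lt_of_le hn2 ?_
    have : Nat.sqrt D.toNat + 1
        ≤ 1600 * (Nat.sqrt D.toNat / 1600) + 40 * (Nat.sqrt D.toNat % 1600 / 40) + 40 := by omega
    exact_mod_cast Nat.mul_le_mul this this
  have hz := hy gy1 gy2 ⟨Nat.sqrt D.toNat % 1600 % 40, by omega⟩
  have hsplit : 1600 * (Nat.sqrt D.toNat / 1600) + 40 * (Nat.sqrt D.toNat % 1600 / 40) +
      Nat.sqrt D.toNat % 1600 % 40 = Nat.sqrt D.toNat := by omega
  rw [hsplit] at hz
  have hzz := hz (by rw [show Nat.sqrt D.toNat + 1 = Nat.sqrt D.toNat + 1 from rfl] at hn2; exact hn1)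
    (by exact_mod_cast hn2)
  obtain ⟨hne, -⟩ := hzz
  have hNS : ∀ t : Int, t * t ≠ D := by
    intro t ht
    have habs : ((t.natAbs : Int)) * ((t.natAbs : Int)) = D := by
      rw [Int.natAbs_mul_self']; exact ht
    have habsN : t.natAbs * t.natAbs = D.toNat := by
      have : (((t.natAbs * t.natAbs : Nat)) : Int) = ((D.toNat : Int)) := by
        rw [hcast]; exact_mod_cast habs
      exact_mod_cast this
    have hsq : Nat.sqrt D.toNat = t.natAbs := by
      rw [← habsN]
      simp [pow_two, Nat.sqrt_eq' t.natAbs]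
    exact hne (by rw [hsq]; exact habs)
  have hsq : fuIsqrt D * fuIsqrt D ≠ D := hNS _
  have hD0 : ¬ D < 0 := by omega
  unfold Spec_fundamental_unit fundamental_unit fundamental_unit_alt
  simp only []
  rw [if_neg hD0, if_neg hD0, if_neg hsq, if_neg hsq]
  have hsim := fuSim D (fuIsqrt D) hNS 1000 0 1 (fuIsqrt D) 1 (fuIsqrt D) 0 1 1
    (Or.inl rfl) one_ne_zero (one_dvd _)
    (by ring) (by ring) (by ring)
  have e1 : 1 * fuIsqrt D - 0 = fuIsqrt D := by ring
  rw [e1, fuFloordivOne] at hsim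
  rw [hsim]
  cases hX : fuExpand D (fuIsqrt D) (fuIsqrt D) (D - fuIsqrt D * fuIsqrt D) 1000 <;> simp
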